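-- pv_equiv track=rewrite | github.com/EmmaLeonhart/aelaki-wikibot | aelaki/numerals.py | partitive
-- ===== SOURCE A (Python) =====
-- UNITS_12: list[str] = [
--     "",       # 0 placeholder
--     "Pan",    # 1
--     "Bal",    # 2
--     "Bhan",   # 3
--     "Mal",    # 4
--     "Tan",    # 5
--     "Dal",    # 6
--     "Dhan",   # 7
--     "Nal",    # 8
--     "Kan",    # 9
--     "Gal",    # 10
--     "Ghan",   # 11
--     "Nger",   # 12 (dozen marker)
-- ]
--
-- PARTITIVES_12: list[str] = [
--     "",           # 0
--     "Papan",      # 1 (one of)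
--     "Babal",      # 2
--     "Bhabhan",    # 3
--     "Mamal",      # 4
--     "Tatan",      # 5
--     "Dadal",      # 6
--     "Dhadhan",    # 7
--     "Nanal",      # 8
--     "Kakan",      # 9
--     "Gagal",      # 10
--     "Ghaghan",    # 11
--     "Ngenger",    # 12
-- ]
--
-- def partitive(n: int) -> str:
--     """Generate partitive number name."""
--     if n <= 0:
--         return str(n)
--     if n == 60:
--         return "Vibhibhi"
--     if n <= 12:
--         return PARTITIVES_12[n]
--     if n < 60:
--         dozens = n // 12
--         remainder = n % 12
--         if remainder == 0:
--             return UNITS_12[dozens] + "Ngenger"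
--         if dozens == 1:
--             prefix = "Nger"
--         else:
--             prefix = UNITS_12[dozens] + "Nger"
--         return prefix + PARTITIVES_12[remainder]
--     # n > 60
--     sixty_count = n // 60
--     rest = n % 60
--     head = ("" if sixty_count == 1 else partitive(sixty_count)) + "Vibhi"
--     if rest == 0:
--         return head
--     return head + partitive(rest)
-- ===== SOURCE B (Python) =====
-- UNITS_12 = [
--     "", "Pan", "Bal", "Bhan", "Mal", "Tan", "Dal", "Dhan", "Nal", "Kan",
--     "Gal", "Ghan", "Nger",
-- ]
--
-- PARTITIVES_12 = [
--     "", "Papan", "Babal", "Bhabhan", "Mamal", "Tatan", "Dadal", "Dhadhan",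
--     "Nanal", "Kakan", "Gagal", "Ghaghan", "Ngenger",
-- ]
--
--
-- def _base(n):
--     """Name for n <= 60 (same guards as the original)."""
--     if n <= 0:
--         return str(n)
--     if n == 60:
--         return "Vibhibhi"
--     if n <= 12:
--         return PARTITIVES_12[n]
--     # 12 < n < 60
--     dozens, remainder = n // 12, n % 12
--     if remainder == 0:
--         return UNITS_12[dozens] + "Ngenger"
--     prefix = "Nger" if dozens == 1 else UNITS_12[dozens] + "Nger"
--     return prefix + PARTITIVES_12[remainder]
--
--
-- def partitive(n: int) -> str:
--     """Generate partitive number name."""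
--     if n <= 60:
--         return _base(n)
--     m, rems = n, []
--     while m > 60:
--         rems.append(m % 60)
--         m //= 60
--     s = "" if m == 1 else _base(m)
--     for r in reversed(rems):
--         s += "Vibhi" + ("" if r == 0 else _base(r))
--     return s
-- ===== Notes on version B (the rewrite author's own statement) =====
-- stated objective: alternative
-- what changed: Replaced the self-recursion on n//60 and n%60 by an explicit base-60 digit loop: remainders are collected iteratively and rendered back-to-front from a non-recursive base-case helper.
import Mathlib
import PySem

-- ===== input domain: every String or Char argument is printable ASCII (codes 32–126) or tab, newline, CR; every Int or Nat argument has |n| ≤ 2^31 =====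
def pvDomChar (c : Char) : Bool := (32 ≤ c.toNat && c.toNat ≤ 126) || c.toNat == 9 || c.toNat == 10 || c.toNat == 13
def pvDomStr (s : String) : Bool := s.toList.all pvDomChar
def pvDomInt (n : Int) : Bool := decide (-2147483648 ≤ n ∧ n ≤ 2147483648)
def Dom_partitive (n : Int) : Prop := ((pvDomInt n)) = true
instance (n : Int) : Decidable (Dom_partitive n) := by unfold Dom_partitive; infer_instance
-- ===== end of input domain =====

-- B replaces A's self-recursion on n//60 and n%60 by an explicit base-60 digit loop
-- rendered back-to-front from a non-recursive base-case helper (objective: alternative).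

-- ===== PORT A =====
def pvUNITS_12 : List String :=
  ["", "Pan", "Bal", "Bhan", "Mal", "Tan", "Dal", "Dhan", "Nal", "Kan",
   "Gal", "Ghan", "Nger"]

def pvPARTITIVES_12 : List String :=
  ["", "Papan", "Babal", "Bhabhan", "Mamal", "Tatan", "Dadal", "Dhadhan",
   "Nanal", "Kakan", "Gagal", "Ghaghan", "Ngenger"]

-- literal port of A; list indices are always in range here, so `.getD ""` never fires
def partitive (n : Int) : String :=
  if n ≤ 0 then PySem.Int.toStr n
  else if n = 60 then "Vibhibhi"
  else if n ≤ 12 then (PySem.List.pyGet? pvPARTITIVES_12 n).getD ""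
  else if n < 60 then
    let dozens := PySem.Int.floordiv n 12
    let remainder := PySem.Int.mod n 12
    if remainder = 0 then (PySem.List.pyGet? pvUNITS_12 dozens).getD "" ++ "Ngenger"
    else
      let prefixStr := if dozens = 1 then "Nger"
                       else (PySem.List.pyGet? pvUNITS_12 dozens).getD "" ++ "Nger"
      prefixStr ++ (PySem.List.pyGet? pvPARTITIVES_12 remainder).getD ""
  else
    let sixtyCount := PySem.Int.floordiv n 60
    let rest := PySem.Int.mod n 60
    let head := (if sixtyCount = 1 then "" else partitive sixtyCount) ++ "Vibhi"
    if rest = 0 then head else head ++ partitive rest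
termination_by n.toNat
decreasing_by
  · have h1 : (0:Int) < 60 := by omega
    have := PySem.Int.floordiv_eq_ediv_of_pos (a := n) h1
    omega
  · have h1 : (0:Int) < 60 := by omega
    have := PySem.Int.mod_eq_emod_of_pos (a := n) h1
    omega

-- ===== PORT B =====
-- B's helper _base: name for n ≤ 60
def pvBase (n : Int) : String :=
  if n ≤ 0 then PySem.Int.toStr n
  else if n = 60 then "Vibhibhi"
  else if n ≤ 12 then (PySem.List.pyGet? pvPARTITIVES_12 n).getD ""
  else
    let dozens := PySem.Int.floordiv n 12
    let remainder := PySem.Int.mod n 12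
    if remainder = 0 then (PySem.List.pyGet? pvUNITS_12 dozens).getD "" ++ "Ngenger"
    else
      let prefixStr := if dozens = 1 then "Nger"
                       else (PySem.List.pyGet? pvUNITS_12 dozens).getD "" ++ "Nger"
      prefixStr ++ (PySem.List.pyGet? pvPARTITIVES_12 remainder).getD ""

-- B's while-loop: collect base-60 remainders until m ≤ 60
def pvLoop (m : Int) (rems : List Int) : Int × List Int :=
  if 60 < m then pvLoop (PySem.Int.floordiv m 60) (rems ++ [PySem.Int.mod m 60])
  else (m, rems)
termination_by m.toNat
decreasing_by
  have h1 : (0:Int) < 60 := by omega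
  have := PySem.Int.floordiv_eq_ediv_of_pos (a := m) h1
  omega

def partitive_alt (n : Int) : String :=
  if n ≤ 60 then pvBase n
  else
    let p := pvLoop n []
    let s := if p.1 = 1 then "" else pvBase p.1
    p.2.reverse.foldl (fun acc r => acc ++ ("Vibhi" ++ (if r = 0 then "" else pvBase r))) s

-- ===== PRECONDITION & SPEC =====
def Spec_partitive (n : Int) (out : String) : Prop := out = partitive_alt n
instance (n : Int) (out : String) : Decidable (Spec_partitive n out) := by unfold Spec_partitive; infer_instance

-- ===== CLAIM (what is proved, stated in full; the proofs are below) =====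
def Claim_equal_partitive : Prop := ∀ (n : Int), Dom_partitive n → Spec_partitive n (partitive n)

-- ===== LEMMAS AND PROOFS =====

-- A agrees with B's helper on the base region
theorem partitive_base_eq (n : Int) (h : n ≤ 60) : partitive n = pvBase n := by
  rw [partitive, pvBase]
  split_ifs with h1 h2 h3 h4 <;> first | rfl | omega

-- the loop accumulator only prepends
theorem pvLoop_acc (m : Int) (rems : List Int) :
    pvLoop m rems = ((pvLoop m []).1, rems ++ (pvLoop m []).2) := by
  by_cases h : 60 < m
  · conv_lhs => rw [pvLoop, if_pos h]
    conv_rhs => rw [pvLoop, if_pos h]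
    rw [pvLoop_acc (PySem.Int.floordiv m 60) (rems ++ [PySem.Int.mod m 60]),
        pvLoop_acc (PySem.Int.floordiv m 60) ([] ++ [PySem.Int.mod m 60])]
    simp
  · conv_lhs => rw [pvLoop, if_neg h]
    conv_rhs => rw [pvLoop, if_neg h]
    simp
termination_by m.toNat
decreasing_by
  all_goals
    have h1 : (0:Int) < 60 := by omega
    have := PySem.Int.floordiv_eq_ediv_of_pos (a := m) h1
    omega

theorem pvLoop_le (m : Int) : (pvLoop m []).1 ≤ 60 := by
  by_cases h : 60 < m
  · rw [pvLoop, if_pos h, pvLoop_acc]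
    exact pvLoop_le (PySem.Int.floordiv m 60)
  · rw [pvLoop, if_neg h]; omega
termination_by m.toNat
decreasing_by
  have h1 : (0:Int) < 60 := by omega
  have := PySem.Int.floordiv_eq_ediv_of_pos (a := m) h1
  omega

-- B satisfies A's recurrence above 60
theorem alt_rec (n : Int) (h : 60 < n) :
    partitive_alt n =
      ((if PySem.Int.floordiv n 60 = 1 then "" else partitive_alt (PySem.Int.floordiv n 60)) ++ "Vibhi")
        ++ (if PySem.Int.mod n 60 = 0 then "" else pvBase (PySem.Int.mod n 60)) := by
  have hq1 : (1:Int) ≤ PySem.Int.floordiv n 60 := by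
    have := PySem.Int.floordiv_eq_ediv_of_pos (a := n) (by omega : (0:Int) < 60)
    have : (1:Int) ≤ n / 60 := by
      have := Int.le_ediv_iff_mul_le (by omega : (0:Int) < 60) (a := 1) (b := n)
      omega
    omega
  rw [partitive_alt, if_neg (by omega), pvLoop, if_pos h,
      pvLoop_acc (PySem.Int.floordiv n 60) ([] ++ [PySem.Int.mod n 60])]
  simp only [List.nil_append, List.reverse_append, List.reverse_cons, List.reverse_nil,
    List.nil_append, List.foldl_append, List.foldl_cons, List.foldl_nil]
  set q := PySem.Int.floordiv n 60 with hq
  by_cases hq60 : 60 < q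
  · rw [if_neg (by omega : ¬ q = 1), partitive_alt, if_neg (by omega : ¬ q ≤ 60)]
    simp only [String.append_assoc]
  · -- q ≤ 60: loop on q returns (q, [])
    have hql : pvLoop q [] = (q, []) := by rw [pvLoop, if_neg hq60]
    rw [hql]
    simp only [List.reverse_nil, List.foldl_nil]
    by_cases hq1' : q = 1
    · simp [hq1']
    · rw [if_neg hq1', if_neg hq1', partitive_alt, if_pos (by omega : q ≤ 60)]
      simp only [String.append_assoc]

-- main equivalence
theorem partitive_eq_alt (n : Int) : partitive n = partitive_alt n := by
  by_cases h : n ≤ 60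
  · rw [partitive_base_eq n h, partitive_alt, if_pos h]
  · have h' : 60 < n := by omega
    have hq1 : (1:Int) ≤ PySem.Int.floordiv n 60 := by
      have := PySem.Int.floordiv_eq_ediv_of_pos (a := n) (by omega : (0:Int) < 60)
      have : (1:Int) ≤ n / 60 := by
        have := Int.le_ediv_iff_mul_le (by omega : (0:Int) < 60) (a := 1) (b := n)
        omega
      omega
    have hqlt : PySem.Int.floordiv n 60 < n := by
      have := PySem.Int.floordiv_eq_ediv_of_pos (a := n) (by omega : (0:Int) < 60)
      have hd := Int.ediv_add_emod n 60
      have h2 := Int.emod_nonneg n (by omega : (60:Int) ≠ 0)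
      omega
    have hr0 : 0 ≤ PySem.Int.mod n 60 ∧ PySem.Int.mod n 60 < 60 := by
      have := PySem.Int.mod_eq_emod_of_pos (a := n) (by omega : (0:Int) < 60)
      have h2 := Int.emod_nonneg n (by omega : (60:Int) ≠ 0)
      have h3 := Int.emod_lt_of_pos n (by omega : (0:Int) < 60)
      omega
    have ihq := partitive_eq_alt (PySem.Int.floordiv n 60)
    have hb : partitive (PySem.Int.mod n 60) = pvBase (PySem.Int.mod n 60) :=
      partitive_base_eq (PySem.Int.mod n 60) (by omega)
    rw [alt_rec n h', partitive, if_neg (by omega), if_neg (by omega),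
        if_neg (by omega), if_neg (by omega)]
    simp only []
    rw [← ihq]
    by_cases hr : PySem.Int.mod n 60 = 0
    · rw [if_pos hr, if_pos hr]; simp
    · rw [if_neg hr, if_neg hr, hb, String.append_assoc]
termination_by n.toNat
decreasing_by
  omega

-- ===== VERDICT (by name: the statement is the Claim_ definition above) =====
theorem partitive_spec : Claim_equal_partitive := by
  intro n _
  unfold Spec_partitive
  exact partitive_eq_alt n
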